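-- pv_equiv track=rewrite | github.com/Cassie-Lim/LOAT | improve_search_v4/misc.py | get_opensearch_times
-- ===== SOURCE A (Python) =====
-- def get_opensearch_times(list_of_actions,index):
--     '''
--     得到为了寻找当前目标，共open了多少个东西
--     '''
--     action = list_of_actions[index][1]
--     if action == 'OpenObject' or action == "CloseObject":
--         return 0
--     else:
--         # 让i从index倒着往回走
--         opensearch_count = 0
--         for i in range(index-1,0,-1):#这里只会取到1
--             if list_of_actions[i][1] == 'CloseObject' and list_of_actions[i-1][1] == 'OpenObject':
--                 opensearch_count = opensearch_count + 1
--             elif list_of_actions[i][1] != 'OpenObject' and list_of_actions[i][1] != 'CloseObject':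
--                 # 是其它正常的动作
--                 break
--         return opensearch_count
-- ===== SOURCE B (Python) =====
-- def get_opensearch_times(list_of_actions, index):
--     if list_of_actions[index][1] in ('OpenObject', 'CloseObject'):
--         return 0
--     # pass 1: backward boundary walk to find the start of the contiguous
--     # Open/Close run directly below index (stopping at 1, like A's range)
--     start = index
--     while start > 1 and list_of_actions[start - 1][1] in ('OpenObject', 'CloseObject'):
--         start -= 1
--     # pass 2: count Open->Close pairs over that run in a forward pass
--     return sum(1 for i in range(start, index)
--                if list_of_actions[i][1] == 'CloseObject'
--                and list_of_actions[i - 1][1] == 'OpenObject')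
-- ===== Notes on version B (the rewrite author's own statement) =====
-- stated objective: alternative
-- what changed: B splits A's fused backward counting loop into two passes: a backward boundary walk that finds the start of the contiguous Open/Close run below index, then a forward pass summing Open->Close pairs over range(start, index).
import Mathlib
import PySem

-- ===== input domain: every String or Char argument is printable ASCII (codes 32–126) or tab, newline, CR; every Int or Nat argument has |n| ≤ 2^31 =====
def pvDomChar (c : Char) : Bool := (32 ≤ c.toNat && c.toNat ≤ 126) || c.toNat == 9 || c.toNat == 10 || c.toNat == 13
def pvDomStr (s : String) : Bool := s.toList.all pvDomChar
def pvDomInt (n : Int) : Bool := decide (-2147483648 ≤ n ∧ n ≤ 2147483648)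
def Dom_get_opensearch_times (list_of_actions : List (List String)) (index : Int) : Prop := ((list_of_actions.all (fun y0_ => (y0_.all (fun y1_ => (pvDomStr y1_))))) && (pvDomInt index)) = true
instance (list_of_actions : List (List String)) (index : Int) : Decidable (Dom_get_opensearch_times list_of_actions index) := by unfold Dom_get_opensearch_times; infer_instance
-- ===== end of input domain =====

-- B splits A's fused backward counting loop into two passes — a backward boundary walk finding
-- the start of the contiguous Open/Close run below index, then a forward pass counting
-- Open->Close pairs over that run; same cost, different decomposition.

-- ===== PORT A =====
-- list_of_actions[i][1], totalised with defaults (Pre_ keeps every access Python performs in range)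
def pvActA (l : List (List String)) (i : Int) : String :=
  PySem.List.pyGetD (PySem.List.pyGetD l i []) 1 ""

-- A's backward for-loop: counter, same branch order, break = returning the accumulator
def pvLoopA (l : List (List String)) : List Int → Int → Int
  | [], c => c
  | i :: rest, c =>
    if pvActA l i = "CloseObject" ∧ pvActA l (i - 1) = "OpenObject" then
      pvLoopA l rest (c + 1)
    else if pvActA l i ≠ "OpenObject" ∧ pvActA l i ≠ "CloseObject" then
      c
    else
      pvLoopA l rest c

def get_opensearch_times (list_of_actions : List (List String)) (index : Int) : Int :=
  let action := pvActA list_of_actions index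
  if action = "OpenObject" ∨ action = "CloseObject" then 0
  else pvLoopA list_of_actions (PySem.List.pyRange (index - 1) 0 (-1)) 0

-- ===== PORT B =====
-- list_of_actions[i][1] for B (same totalisation as A's helper)
def pvActB (l : List (List String)) (i : Int) : String :=
  PySem.List.pyGetD (PySem.List.pyGetD l i []) 1 ""

def pvIsOC (s : String) : Bool := s == "OpenObject" || s == "CloseObject"

-- B's while-loop: from start = index, decrement while start > 1 and acts[start-1] is Open/Close
def pvFindStart (l : List (List String)) : Nat → Nat
  | 0 => 0
  | 1 => 1
  | n + 2 => if pvIsOC (pvActB l ((n : Int) + 1)) then pvFindStart l (n + 1) else n + 2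

-- B's sum(1 for i in range(start, index) if ...)
def pvCountPairs (l : List (List String)) (r : List Int) : Int :=
  r.foldl (fun c i =>
    if pvActB l i = "CloseObject" ∧ pvActB l (i - 1) = "OpenObject"
    then c + 1 else c) 0

def get_opensearch_times_alt (list_of_actions : List (List String)) (index : Int) : Int :=
  if pvIsOC (pvActB list_of_actions index) then 0
  else
    -- for index < 0 the while loop never runs and start stays = index (the 'if' only guards toNat)
    let start : Int := if 0 ≤ index then (pvFindStart list_of_actions index.toNat : Int) else index
    pvCountPairs list_of_actions (PySem.List.pyRange start index 1)

-- ===== PRECONDITION & SPEC =====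
-- neutral helper for Pre_: list_of_actions[i][1] at a nonnegative position, "" when out of range
def pvActP (l : List (List String)) (i : Nat) : String := (l.getD i []).getD 1 ""
def pvOCP (s : String) : Bool := s == "OpenObject" || s == "CloseObject"

-- Pre_ excludes exactly the inputs on which Python A raises IndexError: index out of range,
-- the indexed row shorter than 2, or a short row that A's backward walk actually reads before
-- breaking (the inner bounded ∀ says the walk reaches position i).  B raises on the same inputs.
def Pre_get_opensearch_times (list_of_actions : List (List String)) (index : Int) : Prop :=
  PySem.Raise.InRange list_of_actions.length index ∧
  2 ≤ (PySem.List.pyGetD list_of_actions index []).length ∧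
  (pvOCP (pvActP list_of_actions index.toNat) = false →
    ∀ i < index.toNat, 1 ≤ i →
      (∀ j < index.toNat, i < j → pvOCP (pvActP list_of_actions j) = true) →
      2 ≤ (list_of_actions.getD i []).length ∧
        (pvActP list_of_actions i = "CloseObject" →
          2 ≤ (list_of_actions.getD (i - 1) []).length))

instance (list_of_actions : List (List String)) (index : Int) : Decidable (Pre_get_opensearch_times list_of_actions index) := by unfold Pre_get_opensearch_times; infer_instance

def pvWitness_get_opensearch_times : List (List String) × Int :=
  ([["a", "OpenObject"], ["b", "CloseObject"], ["c", "LookUp"]], 2)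

def Spec_get_opensearch_times (list_of_actions : List (List String)) (index : Int) (out : Int) : Prop := out = get_opensearch_times_alt list_of_actions index
instance (list_of_actions : List (List String)) (index : Int) (out : Int) : Decidable (Spec_get_opensearch_times list_of_actions index out) := by unfold Spec_get_opensearch_times; infer_instance

-- ===== CLAIM (what is proved, stated in full; the proofs are below) =====
def Claim_equal_get_opensearch_times : Prop := ∀ (list_of_actions : List (List String)) (index : Int), Dom_get_opensearch_times list_of_actions index → Pre_get_opensearch_times list_of_actions index → Spec_get_opensearch_times list_of_actions index (get_opensearch_times list_of_actions index)

-- ===== LEMMAS AND PROOFS =====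

theorem pvActB_eq (l : List (List String)) (i : Int) : pvActB l i = pvActA l i := rfl

theorem pvIsOC_iff (s : String) : pvIsOC s = true ↔ s = "OpenObject" ∨ s = "CloseObject" := by
  simp [pvIsOC]

theorem pvFindStart_le (l : List (List String)) : ∀ k : Nat, pvFindStart l k ≤ k
  | 0 => by simp [pvFindStart]
  | 1 => by simp [pvFindStart]
  | n + 2 => by
    simp only [pvFindStart]
    split
    · exact le_trans (pvFindStart_le l (n + 1)) (by omega)
    · omega

theorem pvCountPairs_append_singleton (l : List (List String)) (r : List Int) (i : Int) :
    pvCountPairs l (r ++ [i]) =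
      pvCountPairs l r +
        (if pvActB l i = "CloseObject" ∧ pvActB l (i - 1) = "OpenObject"
         then 1 else 0) := by
  simp only [pvCountPairs, List.foldl_append, List.foldl_cons, List.foldl_nil]
  split <;> ring

-- core: A's fused backward loop from k-1 equals B's two passes on the same prefix
theorem pvCore (l : List (List String)) :
    ∀ k : Nat, 1 ≤ k → ∀ c : Int,
      pvLoopA l (PySem.List.pyRange ((k : Int) - 1) 0 (-1)) c
        = c + pvCountPairs l (PySem.List.pyRange (pvFindStart l k) (k : Int) 1) := by
  intro k hk
  induction k, hk using Nat.le_induction with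
  | base =>
    intro c
    rw [show ((1 : Nat) : Int) - 1 = 0 by norm_num,
        PySem.List.pyRange_neg_one_eq_nil (le_refl 0),
        show pvFindStart l 1 = 1 from rfl,
        PySem.List.pyRange_one_eq_nil (le_refl _)]
    simp [pvLoopA, pvCountPairs]
  | succ n hn ih =>
    obtain ⟨m, rfl⟩ : ∃ m, n = m + 1 := ⟨n - 1, by omega⟩
    intro c
    have hcons : PySem.List.pyRange (((m + 2 : Nat) : Int) - 1) 0 (-1)
        = ((m : Int) + 1) :: PySem.List.pyRange (((m + 1 : Nat) : Int) - 1) 0 (-1) := by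
      rw [PySem.List.pyRange_neg_one_cons (by push_cast; omega)]
      push_cast
      ring_nf
    have hfs : pvFindStart l (m + 2)
        = if pvIsOC (pvActB l ((m : Int) + 1)) then pvFindStart l (m + 1) else m + 2 := rfl
    have hle : pvFindStart l (m + 1) ≤ m + 1 := pvFindStart_le l (m + 1)
    rw [hcons]
    by_cases hC : pvActA l ((m : Int) + 1) = "CloseObject" <;>
      by_cases hO : pvActA l ((m : Int) + 1) = "OpenObject"
    · rw [hC] at hO; exact absurd hO (by decide)
    · -- acts[m+1] = CloseObject
      have hoc : pvIsOC (pvActB l ((m : Int) + 1)) = true := by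
        rw [pvActB_eq, pvIsOC_iff]; right; exact hC
      have hsplit : PySem.List.pyRange ((pvFindStart l (m + 1) : Int)) ((m + 2 : Nat) : Int) 1
          = PySem.List.pyRange ((pvFindStart l (m + 1) : Int)) (((m + 1 : Nat) : Int)) 1
            ++ [((m : Int) + 1)] := by
        have := PySem.List.pyRange_one_succ_right
          (a := (pvFindStart l (m + 1) : Int)) (b := ((m + 1 : Nat) : Int)) (by exact_mod_cast hle)
        rw [show ((m + 2 : Nat) : Int) = ((m + 1 : Nat) : Int) + 1 by push_cast; ring, this]
        push_cast
        ring_nf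
      rw [hfs, hoc, if_pos rfl, hsplit, pvCountPairs_append_singleton]
      rw [pvActB_eq, pvActB_eq, hC]
      by_cases hP : pvActA l ((m : Int) + 1 - 1) = "OpenObject"
      · rw [pvLoopA, if_pos ⟨hC, hP⟩, ih (c + 1), hP]
        simp
        ring
      · rw [pvLoopA, if_neg (fun h => hP h.2), if_neg (fun h => h.2 hC), ih c]
        rw [if_neg (fun h => hP h.2)]
        ring
    · -- acts[m+1] = OpenObject
      have hoc : pvIsOC (pvActB l ((m : Int) + 1)) = true := by
        rw [pvActB_eq, pvIsOC_iff]; left; exact hO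
      have hsplit : PySem.List.pyRange ((pvFindStart l (m + 1) : Int)) ((m + 2 : Nat) : Int) 1
          = PySem.List.pyRange ((pvFindStart l (m + 1) : Int)) (((m + 1 : Nat) : Int)) 1
            ++ [((m : Int) + 1)] := by
        have := PySem.List.pyRange_one_succ_right
          (a := (pvFindStart l (m + 1) : Int)) (b := ((m + 1 : Nat) : Int)) (by exact_mod_cast hle)
        rw [show ((m + 2 : Nat) : Int) = ((m + 1 : Nat) : Int) + 1 by push_cast; ring, this]
        push_cast
        ring_nf
      rw [hfs, hoc, if_pos rfl, hsplit, pvCountPairs_append_singleton]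
      rw [pvActB_eq, pvActB_eq]
      rw [pvLoopA, if_neg (fun h => hC h.1), if_neg (fun h => h.1 hO), ih c]
      rw [if_neg (fun h => hC h.1)]
      ring
    · -- neither: break
      have hoc : pvIsOC (pvActB l ((m : Int) + 1)) = false := by
        rw [pvActB_eq]
        cases h : pvIsOC (pvActA l ((m : Int) + 1))
        · rfl
        · rcases (pvIsOC_iff _).mp h with h' | h'
          · exact absurd h' hO
          · exact absurd h' hC
      rw [hfs, hoc, if_neg (by simp)]
      rw [PySem.List.pyRange_one_eq_nil (by push_cast; omega)]
      rw [pvLoopA, if_neg (fun h => hC h.1), if_pos ⟨hO, hC⟩]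
      simp [pvCountPairs]

theorem pvMain (l : List (List String)) (index : Int) :
    get_opensearch_times l index = get_opensearch_times_alt l index := by
  unfold get_opensearch_times get_opensearch_times_alt
  dsimp only
  rw [pvActB_eq]
  by_cases h : pvActA l index = "OpenObject" ∨ pvActA l index = "CloseObject"
  · rw [if_pos h, if_pos ((pvIsOC_iff _).mpr h)]
  · have hb : pvIsOC (pvActA l index) = false := by
      cases hh : pvIsOC (pvActA l index)
      · rfl
      · exact absurd ((pvIsOC_iff _).mp hh) h
    rw [if_neg h, if_neg (by simp [hb])]
    rcases le_or_gt 1 index with hge | hlt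
    · have hk : index = ((index.toNat : Nat) : Int) := by omega
      rw [hk, if_pos (by positivity), pvCore l index.toNat (by omega) 0, zero_add, Int.toNat_natCast]
    · rw [PySem.List.pyRange_neg_one_eq_nil (by omega)]
      by_cases h0 : 0 ≤ index
      · have : index = 0 := by omega
        subst this
        rw [if_pos (le_refl 0)]
        simp [pvFindStart, pvLoopA, pvCountPairs, PySem.List.pyRange_one_eq_nil (le_refl (0:Int))]
      · rw [if_neg h0, PySem.List.pyRange_one_eq_nil (le_refl index)]
        simp [pvLoopA, pvCountPairs]

-- ===== VERDICT (by name: the statement is the Claim_ definition above) =====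
theorem get_opensearch_times_spec : Claim_equal_get_opensearch_times := by
  intro l index _ _
  exact pvMain l index
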